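-- pv_equiv track=rewrite | github.com/BoyMax/RecipeQA | TSA_model/utils.py | padding_steps
-- ===== SOURCE A (Python) =====
-- def padding_steps(content, type):  #type could be batch_first, or step_first(for hierarchy structure)
--     # padding
--     # 1.find the max step
--     max_step = len(content[0])
--     for sample in content:
--         if len(sample)>max_step:
--             max_step = len(sample)
--
--     # 2.1 batch_first : padding to get the same steps [recipes[steps[words]]]
--     if type == "batch_first":
--         for sample in content:
--             if len(sample)<max_step:
--                 void_step = max_step - len(sample)
--                 for i in range(void_step):
--                     sample.append(['0'])
--
--     # 2.2 step_first padding to get the same steps [steps[recipes[words]]] ---for 'hierarchy'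
--     elif type == "step_first":
--         transposed_recipes = []
--         for step in range(max_step):
--             step_recipes = []
--             for sample in content:
--                 if len(sample)<=step:
--                     step_recipes.append(['0'])
--                 else:
--                     step_recipes.append(sample[step])
--             transposed_recipes.append(step_recipes)
--         content = transposed_recipes
--     return content
-- ===== SOURCE B (Python) =====
-- def padding_steps(content, type):
--     # find the longest sample once
--     max_step = max(len(sample) for sample in content)
--     if type == "batch_first":
--         # pad each sample in place up to max_step (same mutation as the original)
--         for sample in content:
--             sample.extend(['0'] for _ in range(max_step - len(sample)))
--     elif type == "step_first":
--         # pad rectangular copies, then transpose with zip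
--         padded = [sample + [['0'] for _ in range(max_step - len(sample))]
--                   for sample in content]
--         content = [list(col) for col in zip(*padded)]
--     return content
-- ===== Notes on version B (the rewrite author's own statement) =====
-- stated objective: idiomatic
-- what changed: max via a single max() call, and the step_first branch builds rectangular padded copies and transposes them with zip(*...) instead of the hand-written step-outer/sample-inner double loop (reversed loop nesting).
import Mathlib
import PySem

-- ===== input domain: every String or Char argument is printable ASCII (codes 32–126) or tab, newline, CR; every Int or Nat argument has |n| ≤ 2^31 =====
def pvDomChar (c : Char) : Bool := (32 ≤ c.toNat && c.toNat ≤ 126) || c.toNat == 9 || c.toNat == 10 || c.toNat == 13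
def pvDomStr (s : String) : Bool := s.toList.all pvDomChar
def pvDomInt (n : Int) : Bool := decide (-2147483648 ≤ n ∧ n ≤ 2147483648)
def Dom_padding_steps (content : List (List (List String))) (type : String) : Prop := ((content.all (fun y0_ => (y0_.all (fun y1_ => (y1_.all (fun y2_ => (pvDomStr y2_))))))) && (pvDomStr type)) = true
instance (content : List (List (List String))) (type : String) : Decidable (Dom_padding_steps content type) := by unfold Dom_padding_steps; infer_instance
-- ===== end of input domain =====

-- B computes max_step with max() and builds the step_first result by pad-then-zip-transpose
-- instead of A's step-outer/sample-inner double loop; return-value equivalence only: in the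
-- batch_first branch both Pythons mutate `content`'s inner lists in place the same way.

-- ===== PORT A =====
def padding_steps (content : List (List (List String))) (type : String) : List (List (List String)) :=
  -- max_step = len(content[0]); then the running-max loop (content[0] raises on [], excluded by Pre_)
  let max_step : Nat :=
    content.foldl (fun m sample => if sample.length > m then sample.length else m)
      ((content.headD []).length)
  if type = "batch_first" then
    content.map (fun sample =>
      if sample.length < max_step then
        (PySem.List.pyRange 0 ((max_step : Int) - (sample.length : Int)) 1).foldl
          (fun s _ => s ++ [["0"]]) sample
      else sample)
  else if type = "step_first" then
    (PySem.List.pyRange 0 (max_step : Int) 1).foldl (fun tr step =>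
      tr ++ [content.foldl (fun sr sample =>
        if (sample.length : Int) ≤ step then sr ++ [["0"]]
        else sr ++ [(PySem.List.pyGet? sample step).getD []]) []]) []
  else content

-- ===== PORT B =====
-- zip(*xss): take one element from the head of every row while all rows are nonempty
def zipStar (xss : List (List (List String))) : List (List (List String)) :=
  if _h : xss ≠ [] ∧ xss.all (fun s => !s.isEmpty) then
    (xss.map (fun s => s.headD [])) :: zipStar (xss.map (fun s => s.tail))
  else []
termination_by (xss.headD []).length
decreasing_by
  rcases xss with _ | ⟨x, rest⟩
  · exact absurd rfl _h.1
  · have hx : x ≠ [] := by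
      have := _h.2; simp [List.all_cons] at this
      simpa [List.isEmpty_iff] using this.1
    simp only [List.attach_cons, List.map_cons, List.headD_cons, List.length_tail]
    have : 0 < x.length := List.length_pos_iff.mpr hx
    omega

def padding_steps_alt (content : List (List (List String))) (type : String) : List (List (List String)) :=
  -- max_step = max(len(sample) for sample in content)  (max() raises on empty, excluded by Pre_)
  let max_step : Nat := (PySem.List.max? (content.map (fun s => s.length)) (fun y => y)).getD 0
  if type = "batch_first" then
    content.map (fun sample =>
      sample ++ (List.range (max_step - sample.length)).map (fun _ => ["0"]))
  else if type = "step_first" then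
    zipStar (content.map (fun sample =>
      sample ++ (List.range (max_step - sample.length)).map (fun _ => ["0"])))
  else content

-- ===== PRECONDITION & SPEC =====
-- Pre_ excludes only empty content, on which A raises IndexError (len(content[0])).
def Pre_padding_steps (content : List (List (List String))) (type : String) : Prop := content ≠ []
instance (content : List (List (List String))) (type : String) : Decidable (Pre_padding_steps content type) := by unfold Pre_padding_steps; infer_instance
def pvWitness_padding_steps : List (List (List String)) × String := ([[["a"]], [["b"], ["c"]]], "step_first")
def Spec_padding_steps (content : List (List (List String))) (type : String) (out : List (List (List String))) : Prop := out = padding_steps_alt content type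
instance (content : List (List (List String))) (type : String) (out : List (List (List String))) : Decidable (Spec_padding_steps content type out) := by unfold Spec_padding_steps; infer_instance

-- ===== CLAIM (what is proved, stated in full; the proofs are below) =====
def Claim_equal_padding_steps : Prop := ∀ (content : List (List (List String))) (type : String), Dom_padding_steps content type → Pre_padding_steps content type → Spec_padding_steps content type (padding_steps content type)

-- ===== LEMMAS AND PROOFS =====

-- for i in range(k): acc.append(x)  ==  acc ++ [x]*k
theorem foldl_snoc_const {a b : Type} (l : List b) (x : a) (s : List a) :
    l.foldl (fun acc _ => acc ++ [x]) s = s ++ List.replicate l.length x := by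
  induction l generalizing s with
  | nil => simp
  | cons y t ih => simp [List.foldl_cons, ih, List.replicate_succ]

-- A's running-max loop over sample lengths is a foldl max over the lengths
theorem foldl_ifmax (t : List (List (List String))) (a : Nat) :
    t.foldl (fun m sample => if sample.length > m then sample.length else m) a
      = (t.map List.length).foldl max a := by
  induction t generalizing a with
  | nil => rfl
  | cons x t ih =>
      simp only [List.foldl_cons, List.map_cons, ih]
      congr 1
      split_ifs <;> omega

-- indexing into a right-padded row
theorem getD_pad {a : Type} (s : List a) (x d : a) (m j : Nat)
    (hs : s.length ≤ m) (hj : j < m) :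
    (s ++ List.replicate (m - s.length) x).getD j d
      = if s.length ≤ j then x else s.getD j d := by
  by_cases h : s.length ≤ j
  · rw [if_pos h, List.getD_append_right _ _ _ _ h]
    have hlt : j - s.length < m - s.length := by omega
    simp [List.getD_eq_getElem?_getD, hlt]
  · rw [if_neg h, List.getD_append _ _ _ _ (by omega)]

-- zipStar on a nonempty rectangular table of height m lists its m columns
theorem zipStar_eq (m : Nat) : ∀ (xss : List (List (List String))), xss ≠ [] →
    (∀ s ∈ xss, s.length = m) →
    zipStar xss = (List.range m).map (fun j => xss.map (fun s => s.getD j [])) := by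
  induction m with
  | zero =>
      intro xss hne hlen
      rw [zipStar]
      rcases xss with _ | ⟨x, rest⟩
      · exact absurd rfl hne
      · have hx : x = [] := List.length_eq_zero_iff.mp (hlen x (by simp))
        simp [hx]
  | succ m ih =>
      intro xss hne hlen
      rw [zipStar]
      have hall : xss.all (fun s => !s.isEmpty) = true := by
        rw [List.all_eq_true]
        intro s hs
        have hl := hlen s hs
        simp only [Bool.not_eq_eq_eq_not, Bool.not_true, List.isEmpty_eq_false_iff]
        intro h0
        rw [h0] at hl; simp at hl
      rw [dif_pos ⟨hne, hall⟩]
      have htne : xss.map (fun s => s.tail) ≠ [] := by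
        simpa using hne
      have htlen : ∀ s ∈ xss.map (fun s => s.tail), s.length = m := by
        intro s hs
        obtain ⟨u, hu, rfl⟩ := List.mem_map.mp hs
        have := hlen u hu
        simp [List.length_tail, this]
      rw [ih _ htne htlen, List.range_succ_eq_map]
      simp only [List.map_cons, List.map_map]
      refine List.cons_eq_cons.mpr ⟨?_, ?_⟩
      · apply List.map_congr_left
        intro s hs
        have hl := hlen s hs
        rcases s with _ | ⟨a, rest⟩
        · simp at hl
        · rfl
      · apply List.map_congr_left
        intro j _
        simp only [Function.comp_apply, Function.comp_def]
        apply List.map_congr_left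
        intro s hs
        have hl := hlen s hs
        rcases s with _ | ⟨a, rest⟩
        · simp at hl
        · simp

-- ===== VERDICT (by name: the statement is the Claim_ definition above) =====
theorem padding_steps_spec : Claim_equal_padding_steps := by
  intro content type _hdom hpre
  unfold Spec_padding_steps
  simp only [padding_steps, padding_steps_alt]
  rcases content with _ | ⟨h, t⟩
  · exact absurd rfl hpre
  have hA : (h :: t).foldl (fun m sample => if sample.length > m then sample.length else m)
      (((h :: t).headD []).length) = (t.map (fun s => s.length)).foldl max h.length := by
    simp only [List.headD_cons, List.foldl_cons, gt_iff_lt, lt_irrefl, if_false]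
    exact foldl_ifmax t h.length
  have hB : (PySem.List.max? ((h :: t).map (fun s => s.length)) (fun y => y)).getD 0
      = (t.map (fun s => s.length)).foldl max h.length := by
    simp only [List.map_cons]
    rw [PySem.List.max?_id_cons]
    rfl
  rw [hA, hB]
  set M : Nat := (t.map (fun s => s.length)).foldl max h.length with hM
  have hbound : ∀ s ∈ h :: t, s.length ≤ M := by
    intro s hs
    rcases List.mem_cons.mp hs with rfl | hs'
    · exact (PySem.List.le_foldl_max _ _).1
    · exact (PySem.List.le_foldl_max _ _).2 _ (List.mem_map_of_mem hs')
  by_cases ht1 : type = "batch_first"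
  · simp only [ht1, if_true]
    apply List.map_congr_left
    intro s hs
    have hle := hbound s hs
    by_cases hlt : s.length < M
    · rw [if_pos hlt, foldl_snoc_const, PySem.List.length_pyRange_one, List.map_const',
        List.length_range]
      congr 2
      omega
    · rw [if_neg hlt]
      have h0 : M - s.length = 0 := by omega
      simp [h0]
  · rw [if_neg ht1, if_neg ht1]
    by_cases ht2 : type = "step_first"
    · simp only [ht2, if_true]
      -- A side: outer loop is a map over range M
      rw [PySem.List.foldl_append_singleton_eq_map, List.nil_append,
        PySem.List.pyRange_zero_natCast, List.map_map]
      -- B side: zipStar of the rectangular padded table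
      have hpadlen : ∀ s ∈ (h :: t).map (fun sample =>
          sample ++ (List.range (M - sample.length)).map (fun _ => ["0"])), s.length = M := by
        intro s hs
        obtain ⟨u, hu, rfl⟩ := List.mem_map.mp hs
        have := hbound u hu
        simp only [List.length_append, List.length_map, List.length_range]
        omega
      rw [zipStar_eq M _ (by simp) hpadlen]
      apply List.map_congr_left
      intro j hj
      have hjm : j < M := List.mem_range.mp hj
      simp only [Function.comp_apply]
      have hpush : (fun (sr : List (List String)) (sample : List (List String)) =>
          if (sample.length : Int) ≤ ((j : Nat) : Int) then sr ++ [["0"]]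
          else sr ++ [(PySem.List.pyGet? sample ((j : Nat) : Int)).getD []])
          = fun sr sample => sr ++ [if (sample.length : Int) ≤ ((j : Nat) : Int) then ["0"]
            else (PySem.List.pyGet? sample ((j : Nat) : Int)).getD []] := by
        funext sr sample
        split_ifs <;> rfl
      rw [hpush, PySem.List.foldl_append_singleton_eq_map, List.nil_append, List.map_map]
      apply List.map_congr_left
      intro s hs
      have hle := hbound s hs
      simp only [Function.comp]
      rw [List.map_const', List.length_range, getD_pad s (["0"]) [] M j hle hjm]
      by_cases hlej : s.length ≤ j
      · rw [if_pos hlej, if_pos (by exact_mod_cast hlej)]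
      · rw [if_neg hlej, if_neg (by exact_mod_cast hlej)]
        rw [PySem.List.pyGet?_natCast]
        exact (List.getD_eq_getElem?_getD).symm
    · rw [if_neg ht2, if_neg ht2]
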